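-- pv_equiv track=rewrite | github.com/nathanvid/InfinityMageNovel | scripts/translation/infinity_response_parser.py | _detect_organization_context
-- ===== SOURCE A (Python) =====
-- def _detect_organization_context(english: str, context: str) -> bool:
--     """Detect if a term should be categorized as organization"""
--     org_indicators = [
--         'family', 'house', 'clan', 'tribe', 'gang', 'group', 'organization',
--         'guild', 'order', 'society', 'association', 'company', 'faction',
--         'nobility', 'royal', 'government', 'kingdom', 'empire', 'military',
--         'school', 'academy', 'institution'
--     ]
--
--     context_lower = context.lower()
--     english_lower = english.lower()
--
--     for indicator in org_indicators:
--         if indicator in context_lower or indicator in english_lower: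
--             return True
--
--     return False
-- ===== SOURCE B (Python) =====
-- _ORG_WORDS = [
--     'family', 'house', 'clan', 'tribe', 'gang', 'group', 'organization',
--     'guild', 'order', 'society', 'association', 'company', 'faction',
--     'nobility', 'royal', 'government', 'kingdom', 'empire', 'military',
--     'school', 'academy', 'institution'
-- ]
--
--
-- def _scan(s):
--     """Single left-to-right pass: maintain the set of partial matches
--     (remaining suffixes of indicator words) active at the current position,
--     NFA-style, instead of one substring search per word."""
--     active = []
--     for ch in s:
--         nxt = []
--         for rest in active:
--             if rest[0] == ch:
--                 if len(rest) == 1: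
--                     return True
--                 nxt.append(rest[1:])
--         for w in _ORG_WORDS:
--             if w[0] == ch:
--                 if len(w) == 1:
--                     return True
--                 nxt.append(w[1:])
--         active = nxt
--     return False
--
--
-- def _detect_organization_context(english: str, context: str) -> bool:
--     """Detect if a term should be categorized as organization"""
--     return _scan(context.lower()) or _scan(english.lower())
-- ===== Notes on version B (the rewrite author's own statement) =====
-- stated objective: alternative
-- what changed: Replaces 22 independent substring searches (one per indicator, each rescanning both strings) with a single left-to-right pass per string that maintains, NFA-style, the set of active partial matches (remaining suffixes of indicator words) and reports a hit when one is completed.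
import Mathlib
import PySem

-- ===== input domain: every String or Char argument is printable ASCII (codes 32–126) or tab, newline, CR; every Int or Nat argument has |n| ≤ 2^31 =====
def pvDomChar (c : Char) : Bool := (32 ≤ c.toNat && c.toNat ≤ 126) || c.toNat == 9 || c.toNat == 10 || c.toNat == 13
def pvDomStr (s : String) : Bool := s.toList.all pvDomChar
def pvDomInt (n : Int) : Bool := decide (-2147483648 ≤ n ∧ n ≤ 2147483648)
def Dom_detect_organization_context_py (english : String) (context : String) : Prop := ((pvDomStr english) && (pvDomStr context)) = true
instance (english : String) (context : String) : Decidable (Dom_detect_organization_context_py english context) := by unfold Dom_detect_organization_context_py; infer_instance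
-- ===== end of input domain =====

-- B replaces A's per-indicator substring searches by one left-to-right pass per
-- string that maintains the set of active partial matches (alternative; same results).

-- ===== PORT A =====
def orgIndicators : List String :=
  ["family", "house", "clan", "tribe", "gang", "group", "organization",
   "guild", "order", "society", "association", "company", "faction",
   "nobility", "royal", "government", "kingdom", "empire", "military",
   "school", "academy", "institution"]

-- the `for indicator in org_indicators: if …: return True` loop
def detectLoop (context_lower english_lower : String) : List String → Bool
  | [] => false
  | ind :: rest =>
    if PySem.Str.isIn ind context_lower || PySem.Str.isIn ind english_lower then true
    else detectLoop context_lower english_lower rest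

def detect_organization_context_py (english : String) (context : String) : Bool :=
  let context_lower := PySem.Str.lower context
  let english_lower := PySem.Str.lower english
  detectLoop context_lower english_lower orgIndicators

-- ===== PORT B =====
-- the _ORG_WORDS list, as character lists
def orgWords : List (List Char) :=
  (["family", "house", "clan", "tribe", "gang", "group", "organization",
    "guild", "order", "society", "association", "company", "faction",
    "nobility", "royal", "government", "kingdom", "empire", "military",
    "school", "academy", "institution"] : List String).map String.toList

-- one inner `for rest in …` loop of _scan: advance every tail past `ch`;
-- `none` models the `return True` taken when a match completes (len == 1)
def advanceTails (ch : Char) : List (List Char) → Option (List (List Char))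
  | [] => some []
  | [] :: ts => advanceTails ch ts          -- unreachable: tails kept nonempty
  | (c :: rest) :: ts =>
    if c == ch then
      if rest = [] then none                 -- `return True`
      else (advanceTails ch ts).map (rest :: ·)
    else advanceTails ch ts

-- the `for ch in s` loop of _scan with its `active` accumulator
def scanChars (s : List Char) (active : List (List Char)) : Bool :=
  match s with
  | [] => false
  | ch :: s' =>
    match advanceTails ch active with
    | none => true
    | some n1 =>
      match advanceTails ch orgWords with
      | none => true
      | some n2 => scanChars s' (n1 ++ n2)

def detect_organization_context_py_alt (english : String) (context : String) : Bool :=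
  scanChars (PySem.Str.lower context).toList []
    || scanChars (PySem.Str.lower english).toList []

-- ===== PRECONDITION & SPEC =====
def Spec_detect_organization_context_py (english : String) (context : String) (out : Bool) : Prop := out = detect_organization_context_py_alt english context
instance (english : String) (context : String) (out : Bool) : Decidable (Spec_detect_organization_context_py english context out) := by unfold Spec_detect_organization_context_py; infer_instance

-- ===== CLAIM (what is proved, stated in full; the proofs are below) =====
def Claim_equal_detect_organization_context_py : Prop := ∀ (english : String) (context : String), Dom_detect_organization_context_py english context → Spec_detect_organization_context_py english context (detect_organization_context_py english context)

-- ===== LEMMAS AND PROOFS =====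
theorem detectLoop_eq_any (c e : String) (l : List String) :
    detectLoop c e l = l.any (fun ind => PySem.Str.isIn ind c || PySem.Str.isIn ind e) := by
  induction l with
  | nil => rfl
  | cons ind rest ih =>
    rw [detectLoop, List.any_cons, ← ih]
    cases h : (PySem.Str.isIn ind c || PySem.Str.isIn ind e) <;> simp

theorem advanceTails_none_iff (ch : Char) (ts : List (List Char)) :
    advanceTails ch ts = none ↔ [ch] ∈ ts := by
  induction ts with
  | nil => simp [advanceTails]
  | cons t ts ih =>
    cases t with
    | nil => rw [advanceTails]; simp [ih]
    | cons c rest =>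
      rw [advanceTails]
      by_cases hc : c = ch
      · subst hc
        simp only [beq_self_eq_true, if_true]
        by_cases hr : rest = []
        · subst hr; simp
        · rw [if_neg hr]
          cases h : advanceTails c ts with
          | none => simp [ih.mp h]
          | some ns =>
            simp only [Option.map_some, reduceCtorEq, false_iff, List.mem_cons]
            rintro (hx | hx)
            · injection hx with _ h2; exact hr h2.symm
            · rw [ih.mpr hx] at h; cases h
      · rw [if_neg (by simp [hc]), ih]
        simp only [List.mem_cons]
        constructor
        · exact Or.inr
        · rintro (hx | hx)
          · injection hx with h1 _; exact absurd h1.symm hc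
          · exact hx

theorem advanceTails_some_mem (ch : Char) (ts ns : List (List Char))
    (h : advanceTails ch ts = some ns) (r : List Char) :
    r ∈ ns ↔ r ≠ [] ∧ ch :: r ∈ ts := by
  induction ts generalizing ns with
  | nil =>
    simp only [advanceTails, Option.some.injEq] at h
    subst h; simp
  | cons t ts ih =>
    cases t with
    | nil =>
      rw [advanceTails] at h
      simp [ih ns h]
    | cons c rest =>
      by_cases hc : c = ch
      · subst hc
        rw [advanceTails, if_pos (by simp)] at h
        by_cases hr : rest = []
        · rw [if_pos hr] at h; exact absurd h (by simp)
        · rw [if_neg hr] at h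
          cases h' : advanceTails c ts with
          | none => rw [h'] at h; exact absurd h (by simp)
          | some ns' =>
            rw [h'] at h
            simp only [Option.map_some, Option.some.injEq] at h
            subst h
            simp only [List.mem_cons, ih ns' h', List.cons.injEq, true_and]
            constructor
            · rintro (rfl | ⟨hne, hm⟩)
              · exact ⟨hr, Or.inl rfl⟩
              · exact ⟨hne, Or.inr hm⟩
            · rintro ⟨hne, rfl | hm⟩
              · exact Or.inl rfl
              · exact Or.inr ⟨hne, hm⟩
      · rw [advanceTails, if_neg (by simp [hc])] at h
        simp only [ih ns h, List.mem_cons, List.cons.injEq]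
        constructor
        · rintro ⟨hne, hm⟩; exact ⟨hne, Or.inr hm⟩
        · rintro ⟨hne, ⟨rfl, _⟩ | hm⟩
          · exact absurd rfl hc
          · exact ⟨hne, hm⟩

-- one step of the `active` set, in terms of prefixes
theorem tails_prefix_step (ch : Char) (s' : List Char) (ts : List (List Char)) :
    (∃ t ∈ ts, t ≠ [] ∧ t <+: ch :: s') ↔
      (advanceTails ch ts = none ∨
        ∃ ns, advanceTails ch ts = some ns ∧ ∃ r ∈ ns, r ≠ [] ∧ r <+: s') := by
  cases h : advanceTails ch ts with
  | none =>
    simp only [true_or, iff_true]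
    exact ⟨[ch], (advanceTails_none_iff ch ts).mp h, by simp,
      ⟨s', rfl⟩⟩
  | some ns =>
    simp only [reduceCtorEq, false_or, Option.some.injEq,
      exists_eq_left']
    constructor
    · rintro ⟨t, hm, hne, hp⟩
      rcases t with _ | ⟨c, t'⟩
      · exact absurd rfl hne
      · obtain ⟨u, hu⟩ := hp
        injection hu with h1 h2
        subst h1
        have ht' : t' ≠ [] := by
          rintro rfl
          have := (advanceTails_none_iff c ts).mpr hm
          rw [h] at this; exact absurd this (by simp)
        exact ⟨t', (advanceTails_some_mem c ts ns h t').mpr ⟨ht', hm⟩, ht', ⟨u, h2⟩⟩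
    · rintro ⟨r, hr, hne, hp⟩
      obtain ⟨hne', hm⟩ := (advanceTails_some_mem ch ts ns h r).mp hr
      obtain ⟨u, hu⟩ := hp
      exact ⟨ch :: r, hm, by simp, ⟨u, by simp [hu]⟩⟩

theorem orgWords_ne_nil : ∀ w ∈ orgWords, w ≠ [] := by decide

-- main invariant of the scan
theorem scanChars_iff (s : List Char) (active : List (List Char)) :
    scanChars s active = true ↔
      (∃ t ∈ active, t ≠ [] ∧ t <+: s) ∨ ∃ w ∈ orgWords, w <:+: s := by
  induction s generalizing active with
  | nil =>
    simp only [scanChars, Bool.false_eq_true, false_iff]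
    rintro (⟨t, _, hne, hp⟩ | ⟨w, hm, hi⟩)
    · exact hne (List.prefix_nil.mp hp)
    · exact orgWords_ne_nil w hm (List.infix_nil.mp hi)
  | cons ch s' ih =>
    rw [scanChars]
    have hwords : (∃ w ∈ orgWords, w <+: ch :: s') ↔
        (advanceTails ch orgWords = none ∨
          ∃ ns, advanceTails ch orgWords = some ns ∧ ∃ r ∈ ns, r ≠ [] ∧ r <+: s') := by
      rw [← tails_prefix_step]
      constructor
      · rintro ⟨w, hm, hp⟩; exact ⟨w, hm, orgWords_ne_nil w hm, hp⟩
      · rintro ⟨w, hm, _, hp⟩; exact ⟨w, hm, hp⟩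
    have hinfix : (∃ w ∈ orgWords, w <:+: ch :: s') ↔
        (∃ w ∈ orgWords, w <+: ch :: s') ∨ ∃ w ∈ orgWords, w <:+: s' := by
      constructor
      · rintro ⟨w, hm, hi⟩
        rcases List.infix_cons_iff.mp hi with hp | hi'
        · exact Or.inl ⟨w, hm, hp⟩
        · exact Or.inr ⟨w, hm, hi'⟩
      · rintro (⟨w, hm, hp⟩ | ⟨w, hm, hi⟩)
        · exact ⟨w, hm, hp.isInfix⟩
        · exact ⟨w, hm, hi.trans (List.suffix_cons ch s').isInfix⟩
    cases h1 : advanceTails ch active with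
    | none =>
      simp only [true_iff]
      exact Or.inl ((tails_prefix_step ch s' active).mpr (Or.inl h1))
    | some n1 =>
      cases h2 : advanceTails ch orgWords with
      | none =>
        simp only [true_iff]
        exact Or.inr (hinfix.mpr (Or.inl (hwords.mpr (Or.inl h2))))
      | some n2 =>
        rw [ih]
        rw [hinfix, hwords, h2]
        rw [tails_prefix_step ch s' active, h1]
        simp only [reduceCtorEq, false_or, Option.some.injEq, exists_eq_left']
        constructor
        · rintro (⟨t, hm, hne, hp⟩ | hw)
          · rcases List.mem_append.mp hm with hm1 | hm2
            · exact Or.inl ⟨t, hm1, hne, hp⟩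
            · exact Or.inr (Or.inl ⟨t, hm2, hne, hp⟩)
          · exact Or.inr (Or.inr hw)
        · rintro (⟨t, hm, hne, hp⟩ | ⟨t, hm, hne, hp⟩ | hw)
          · exact Or.inl ⟨t, List.mem_append.mpr (Or.inl hm), hne, hp⟩
          · exact Or.inl ⟨t, List.mem_append.mpr (Or.inr hm), hne, hp⟩
          · exact Or.inr hw

theorem scanChars_nil_iff (s : List Char) :
    scanChars s [] = true ↔ ∃ w ∈ orgWords, w <:+: s := by
  rw [scanChars_iff]; simp

theorem orgWords_eq : orgWords = orgIndicators.map String.toList := rfl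

-- ===== VERDICT (by name: the statement is the Claim_ definition above) =====
theorem detect_organization_context_py_spec : Claim_equal_detect_organization_context_py := by
  intro english context _
  unfold Spec_detect_organization_context_py
  unfold detect_organization_context_py detect_organization_context_py_alt
  simp only [detectLoop_eq_any]
  rw [Bool.eq_iff_iff]
  simp only [List.any_eq_true, Bool.or_eq_true, scanChars_nil_iff, orgWords_eq,
    List.mem_map, PySem.Str.isIn_iff_infix]
  constructor
  · rintro ⟨ind, hind, h | h⟩
    · exact Or.inl ⟨ind.toList, ⟨ind, hind, rfl⟩, h⟩
    · exact Or.inr ⟨ind.toList, ⟨ind, hind, rfl⟩, h⟩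
  · rintro (⟨w, ⟨ind, hind, rfl⟩, h⟩ | ⟨w, ⟨ind, hind, rfl⟩, h⟩)
    · exact ⟨ind, hind, Or.inl h⟩
    · exact ⟨ind, hind, Or.inr h⟩
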